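-- pv_equiv track=rewrite | github.com/Ichi667/dota-2-test-custom-game | test/scripts/vscripts/wearables_system/python/update/file.py | count_braces_outside_strings
-- ===== SOURCE A (Python) =====
-- def count_braces_outside_strings(s: str):
--     # Считаем { и } игнорируя то, что внутри '...' и "..." (достаточно для таких lua-таблиц)
--     in_sq = False
--     in_dq = False
--     esc = False
--     opens = closes = 0
--     for ch in s:
--         if esc:
--             esc = False
--             continue
--         if ch == "\\":
--             esc = True
--             continue
--         if not in_dq and ch == "'":
--             in_sq = not in_sq
--             continue
--         if not in_sq and ch == '"':
--             in_dq = not in_dq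
--             continue
--         if in_sq or in_dq:
--             continue
--         if ch == "{":
--             opens += 1
--         elif ch == "}":
--             closes += 1
--     return opens, closes
-- ===== SOURCE B (Python) =====
-- def count_braces_outside_strings(s: str):
--     # Filter pass: collect chars that survive the scanner (outside quotes,
--     # not escapes/quotes themselves), then count braces with str.count.
--     in_sq = False
--     in_dq = False
--     esc = False
--     kept = []
--     for ch in s:
--         if esc:
--             esc = False
--         elif ch == "\\":
--             esc = True
--         elif not in_dq and ch == "'":
--             in_sq = not in_sq
--         elif not in_sq and ch == '"':
--             in_dq = not in_dq
--         elif not (in_sq or in_dq):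
--             kept.append(ch)
--     cleaned = "".join(kept)
--     return cleaned.count("{"), cleaned.count("}")
-- ===== Notes on version B (the rewrite author's own statement) =====
-- stated objective: alternative
-- what changed: The fused scan-and-count loop is split into a filter pass that collects the characters surviving the quote/escape scanner, followed by two library str.count calls on the cleaned string.
import Mathlib
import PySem

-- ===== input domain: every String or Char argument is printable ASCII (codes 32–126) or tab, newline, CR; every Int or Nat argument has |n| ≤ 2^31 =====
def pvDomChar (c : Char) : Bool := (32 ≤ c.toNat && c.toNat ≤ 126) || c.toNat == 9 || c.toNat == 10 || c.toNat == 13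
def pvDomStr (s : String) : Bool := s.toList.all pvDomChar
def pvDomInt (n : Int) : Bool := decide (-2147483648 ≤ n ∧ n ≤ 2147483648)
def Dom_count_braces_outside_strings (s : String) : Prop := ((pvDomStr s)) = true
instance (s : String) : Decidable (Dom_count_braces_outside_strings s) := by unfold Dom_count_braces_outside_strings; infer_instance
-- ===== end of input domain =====

-- B splits A's fused scan-and-count loop into a filter pass plus two library counts (alternative decomposition, same return value).
-- ===== PORT A =====
-- for ch in s: fused scanner that counts braces inline (state: in_sq, in_dq, esc, opens, closes)
def cbosLoopA : List Char → Bool → Bool → Bool → Int → Int → Int × Int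
  | [], _, _, _, opens, closes => (opens, closes)
  | ch :: rest, in_sq, in_dq, esc, opens, closes =>
    if esc then cbosLoopA rest in_sq in_dq false opens closes
    else if ch = '\\' then cbosLoopA rest in_sq in_dq true opens closes
    else if !in_dq && ch = '\'' then cbosLoopA rest (!in_sq) in_dq esc opens closes
    else if !in_sq && ch = '"' then cbosLoopA rest in_sq (!in_dq) esc opens closes
    else if in_sq || in_dq then cbosLoopA rest in_sq in_dq esc opens closes
    else if ch = '{' then cbosLoopA rest in_sq in_dq esc (opens + 1) closes
    else if ch = '}' then cbosLoopA rest in_sq in_dq esc opens (closes + 1)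
    else cbosLoopA rest in_sq in_dq esc opens closes

def count_braces_outside_strings (s : String) : Int × Int :=
  cbosLoopA s.toList false false false 0 0

-- ===== PORT B =====
-- filter pass: keep exactly the characters that reach A's counting stage
def cbosScanB : List Char → Bool → Bool → Bool → List Char
  | [], _, _, _ => []
  | ch :: rest, in_sq, in_dq, esc =>
    if esc then cbosScanB rest in_sq in_dq false
    else if ch = '\\' then cbosScanB rest in_sq in_dq true
    else if !in_dq && ch = '\'' then cbosScanB rest (!in_sq) in_dq esc
    else if !in_sq && ch = '"' then cbosScanB rest in_sq (!in_dq) esc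
    else if !(in_sq || in_dq) then ch :: cbosScanB rest in_sq in_dq esc
    else cbosScanB rest in_sq in_dq esc

def count_braces_outside_strings_alt (s : String) : Int × Int :=
  let cleaned := cbosScanB s.toList false false false
  ((cleaned.count '{' : Int), (cleaned.count '}' : Int))

-- ===== PRECONDITION & SPEC =====
def Spec_count_braces_outside_strings (s : String) (out : Int × Int) : Prop := out = count_braces_outside_strings_alt s
instance (s : String) (out : Int × Int) : Decidable (Spec_count_braces_outside_strings s out) := by unfold Spec_count_braces_outside_strings; infer_instance

-- ===== CLAIM (what is proved, stated in full; the proofs are below) =====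
def Claim_equal_count_braces_outside_strings : Prop := ∀ (s : String), Dom_count_braces_outside_strings s → Spec_count_braces_outside_strings s (count_braces_outside_strings s)

-- ===== LEMMAS AND PROOFS =====
theorem cbosLoopA_eq_scan (l : List Char) : ∀ (sq dq e : Bool) (o c : Int),
    cbosLoopA l sq dq e o c =
      (o + ((cbosScanB l sq dq e).count '{' : Int), c + ((cbosScanB l sq dq e).count '}' : Int)) := by
  induction l with
  | nil => intro sq dq e o c; simp [cbosLoopA, cbosScanB]
  | cons ch rest ih =>
    intro sq dq e o c
    simp only [cbosLoopA, cbosScanB]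
    by_cases h1 : e = true
    · rw [if_pos h1, if_pos h1]; exact ih ..
    · rw [if_neg h1, if_neg h1]
      by_cases h2 : ch = '\\'
      · rw [if_pos h2, if_pos h2]; exact ih ..
      · rw [if_neg h2, if_neg h2]
        by_cases h3 : (!dq && decide (ch = '\'')) = true
        · rw [if_pos h3, if_pos h3]; exact ih ..
        · rw [if_neg h3, if_neg h3]
          by_cases h4 : (!sq && decide (ch = '"')) = true
          · rw [if_pos h4, if_pos h4]; exact ih ..
          · rw [if_neg h4, if_neg h4]
            by_cases h5 : (sq || dq) = true
            · rw [if_pos h5, if_neg (by simp [h5])]; exact ih ..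
            · rw [if_neg h5]
              have hb : (!(sq || dq)) = true := by simp_all
              rw [if_pos hb]
              by_cases h6 : ch = '{'
              · rw [if_pos h6, ih]
                simp [List.count_cons, h6, Prod.ext_iff]
                omega
              · rw [if_neg h6]
                by_cases h7 : ch = '}'
                · rw [if_pos h7, ih]
                  simp [List.count_cons, h7, h6, Prod.ext_iff]
                  omega
                · rw [if_neg h7, ih]
                  simp [List.count_cons, h6, h7]

-- ===== VERDICT (by name: the statement is the Claim_ definition above) =====
theorem count_braces_outside_strings_spec : Claim_equal_count_braces_outside_strings := by
  intro s _
  unfold Spec_count_braces_outside_strings count_braces_outside_strings count_braces_outside_strings_alt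
  simp [cbosLoopA_eq_scan]
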